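-- pv_equiv track=rewrite | github.com/megafyk/scratch2test | lc/two_pointer/maximum-number-of-integers-to-choose-from-a-range-i.py | maxCount
-- ===== SOURCE A (Python) =====
-- from typing import List
--
-- def maxCount(banned: List[int], n: int, maxSum: int) -> int:
--     # time O(N), space O(N)
--     s = set(banned)
--     res = 0
--     cur_sum = 0
--     for num in range(1, n+1):
--         if num not in s:
--             if cur_sum + num > maxSum:
--                 return res
--             cur_sum += num
--             res += 1
--     return res
-- ===== SOURCE B (Python) =====
-- def maxCount(banned, n, maxSum):
--     # Binary search for the largest cutoff m in [0, n] whose non-banned sum fits in maxSum;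
--     # count/sum of banned values up to m come off the sorted banned list via prefix sums.
--     bs = sorted(set(banned))
--     if n <= 0 or maxSum < 0:
--         return 0
--     pref = [0]
--     run = 0
--     for b in bs:
--         run += b
--         pref.append(run)
--
--     def bis(m):
--         # first position in bs holding a value > m
--         lo, hi = 0, len(bs)
--         while lo < hi:
--             mid = (lo + hi) // 2
--             if bs[mid] <= m:
--                 lo = mid + 1
--             else:
--                 hi = mid
--         return lo
--
--     i0 = bis(0)
--
--     def stats(m):
--         # (count, sum) of the non-banned integers in [1, m]
--         i = bis(m)
--         return m - (i - i0), m * (m + 1) // 2 - (pref[i] - pref[i0])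
--
--     lo, hi = 0, n
--     while lo < hi:
--         mid = (lo + hi + 1) // 2
--         if stats(mid)[1] <= maxSum:
--             lo = mid
--         else:
--             hi = mid - 1
--     return stats(lo)[0]
-- ===== Notes on version B (the rewrite author's own statement) =====
-- stated objective: alternative
-- what changed: A greedily scans every integer 1..n accumulating the running sum; B sorts the deduplicated banned list with prefix sums and binary-searches the largest cutoff m whose non-banned sum over [1,m] (triangular number minus banned prefix sum, located by an inner bisection) fits in maxSum.
import Mathlib
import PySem

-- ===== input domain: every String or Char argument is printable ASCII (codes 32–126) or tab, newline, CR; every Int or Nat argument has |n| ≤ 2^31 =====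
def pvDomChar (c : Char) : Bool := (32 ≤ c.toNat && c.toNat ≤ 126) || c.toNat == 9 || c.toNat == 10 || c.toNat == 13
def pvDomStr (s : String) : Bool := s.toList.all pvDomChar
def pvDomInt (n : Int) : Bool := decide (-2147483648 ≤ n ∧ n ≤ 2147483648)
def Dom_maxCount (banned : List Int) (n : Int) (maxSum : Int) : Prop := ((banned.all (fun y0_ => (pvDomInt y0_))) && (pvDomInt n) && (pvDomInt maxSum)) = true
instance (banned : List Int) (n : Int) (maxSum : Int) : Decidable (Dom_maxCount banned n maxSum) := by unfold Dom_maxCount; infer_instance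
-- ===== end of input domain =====

-- B replaces A's linear greedy scan of 1..n by a binary search on the cutoff m,
-- reading count/sum of banned values up to m off a sorted banned list with prefix sums.

-- ===== PORT A =====
-- the for-loop of A with early return: state (res, cur_sum); 'for num in range(1, n+1)'
-- iterated on the index num, exactly as Python's lazy range object is
def maxCountLoop (s : PySem.Set Int) (n maxSum : Int) (num res cur : Int) : Int :=
  if num < n + 1 then
    if ¬ (num ∈ s) then
      if cur + num > maxSum then res
      else maxCountLoop s n maxSum (num + 1) (res + 1) (cur + num)
    else maxCountLoop s n maxSum (num + 1) res cur
  else res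
termination_by (n + 1 - num).toNat
decreasing_by all_goals omega

def maxCount (banned : List Int) (n : Int) (maxSum : Int) : Int :=
  let s : PySem.Set Int := PySem.Set.ofList banned
  maxCountLoop s n maxSum 1 0 0

-- ===== PORT B =====
-- the hand-written bisection loop of Source B ('while lo < hi' over positions in bs;
-- the fuel only makes it total: the loop runs at most len(bs) times)
def bisLoop (bs : List Int) (m : Int) : Nat → Int → Int → Int
  | 0, lo, _hi => lo
  | fuel + 1, lo, hi =>
    if lo < hi then
      if PySem.List.pyGetD bs (PySem.Int.floordiv (lo + hi) 2) 0 ≤ m then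
        bisLoop bs m fuel (PySem.Int.floordiv (lo + hi) 2 + 1) hi
      else bisLoop bs m fuel lo (PySem.Int.floordiv (lo + hi) 2)
    else lo

def bis (bs : List Int) (m : Int) : Int := bisLoop bs m bs.length 0 (bs.length : Int)

-- stats(m) of Source B: (count, sum) of the non-banned integers in [1, m]
def altStats (bs pref : List Int) (i0 m : Int) : Int × Int :=
  (m - (bis bs m - i0),
   PySem.Int.floordiv (m * (m + 1)) 2 - (PySem.List.pyGetD pref (bis bs m) 0 - PySem.List.pyGetD pref i0 0))

-- the outer while-loop of Source B (fuel again only for totality: ≤ hi-lo iterations)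
def altSearch (bs pref : List Int) (i0 maxSum : Int) : Nat → Int → Int → Int
  | 0, lo, _hi => lo
  | fuel + 1, lo, hi =>
    if lo < hi then
      if (altStats bs pref i0 (PySem.Int.floordiv (lo + hi + 1) 2)).2 ≤ maxSum then
        altSearch bs pref i0 maxSum fuel (PySem.Int.floordiv (lo + hi + 1) 2) hi
      else altSearch bs pref i0 maxSum fuel lo (PySem.Int.floordiv (lo + hi + 1) 2 - 1)
    else lo

def maxCount_alt (banned : List Int) (n : Int) (maxSum : Int) : Int :=
  let bs : List Int := PySem.List.sorted (PySem.Set.ofList banned) (fun x => x) false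
  if n ≤ 0 ∨ maxSum < 0 then 0
  else
    let pref : List Int :=
      (bs.foldl (fun (st : List Int × Int) b => (st.1 ++ [st.2 + b], st.2 + b)) ([0], 0)).1
    let i0 : Int := bis bs 0
    (altStats bs pref i0 (altSearch bs pref i0 maxSum n.toNat 0 n)).1

-- ===== PRECONDITION & SPEC =====
def Spec_maxCount (banned : List Int) (n : Int) (maxSum : Int) (out : Int) : Prop := out = maxCount_alt banned n maxSum
instance (banned : List Int) (n : Int) (maxSum : Int) (out : Int) : Decidable (Spec_maxCount banned n maxSum out) := by unfold Spec_maxCount; infer_instance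

-- ===== CLAIM (what is proved, stated in full; the proofs are below) =====
def Claim_equal_maxCount : Prop := ∀ (banned : List Int) (n : Int) (maxSum : Int), Dom_maxCount banned n maxSum → Spec_maxCount banned n maxSum (maxCount banned n maxSum)

-- ===== LEMMAS AND PROOFS =====

-- count and sum of the elements ≤ m of a list
def cntOf (l : List Int) (m : Int) : Int := ((l.filter (fun b => decide (b ≤ m))).length : Int)
def sumOf (l : List Int) (m : Int) : Int := (l.filter (fun b => decide (b ≤ m))).sum

-- mathematical reading of stats(m): count and sum of the non-banned integers in [1, m]
def CfM (bs : List Int) (m : Int) : Int := m - (cntOf bs m - cntOf bs 0)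
def SfM (bs : List Int) (m : Int) : Int :=
  PySem.Int.floordiv (m * (m + 1)) 2 - (sumOf bs m - sumOf bs 0)

theorem tri_step (a : Int) :
    PySem.Int.floordiv (a * (a + 1)) 2 = PySem.Int.floordiv ((a - 1) * a) 2 + a := by
  rw [PySem.Int.floordiv_eq_ediv_of_pos (by norm_num : (0:Int) < 2),
      PySem.Int.floordiv_eq_ediv_of_pos (by norm_num : (0:Int) < 2)]
  have h : a * (a + 1) = (a - 1) * a + a * 2 := by ring
  rw [h, Int.add_mul_ediv_right _ _ (by norm_num)]

theorem cntOf_step (bs : List Int) (a : Int) (hnd : bs.Nodup) :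
    cntOf bs a = cntOf bs (a - 1) + (if a ∈ bs then 1 else 0) := by
  induction bs with
  | nil => simp [cntOf]
  | cons b t ih =>
    have hnd' : t.Nodup := hnd.of_cons
    have hb : b ∉ t := (List.nodup_cons.mp hnd).1
    by_cases hba : b = a
    · subst hba
      have h1 : decide (b ≤ b) = true := by simp
      have h2 : decide (b ≤ b - 1) = false := by simp
      simp [cntOf] at *
      have := ih hnd'
      simp [hb] at this ⊢
      omega
    · have hmem : (a ∈ b :: t) = (a ∈ t) := by simp [eq_comm]; tauto
      by_cases h : b ≤ a - 1
      · have h1 : decide (b ≤ a) = true := by simp; omega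
        have h2 : decide (b ≤ a - 1) = true := by simpa using h
        simp only [cntOf, List.filter_cons, h1, h2, if_true] at *
        have := ih hnd'
        simp [hmem] at *
        omega
      · have h1 : decide (b ≤ a) = false := by simp; omega
        have h2 : decide (b ≤ a - 1) = false := by simpa using h
        simp only [cntOf, List.filter_cons, h1, h2] at *
        have := ih hnd'
        simp [hmem] at *
        omega

theorem sumOf_step (bs : List Int) (a : Int) (hnd : bs.Nodup) :
    sumOf bs a = sumOf bs (a - 1) + (if a ∈ bs then a else 0) := by
  induction bs with
  | nil => simp [sumOf]
  | cons b t ih =>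
    have hnd' : t.Nodup := hnd.of_cons
    have hb : b ∉ t := (List.nodup_cons.mp hnd).1
    by_cases hba : b = a
    · subst hba
      have h1 : decide (b ≤ b) = true := by simp
      have h2 : decide (b ≤ b - 1) = false := by simp
      simp [sumOf] at *
      have := ih hnd'
      simp [hb] at this ⊢
      omega
    · have hmem : (a ∈ b :: t) = (a ∈ t) := by simp [eq_comm]; tauto
      by_cases h : b ≤ a - 1
      · have h1 : decide (b ≤ a) = true := by simp; omega
        have h2 : decide (b ≤ a - 1) = true := by simpa using h
        simp only [sumOf, List.filter_cons, h1, h2, if_true] at *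
        have := ih hnd'
        simp [hmem] at *
        omega
      · have h1 : decide (b ≤ a) = false := by simp; omega
        have h2 : decide (b ≤ a - 1) = false := by simpa using h
        simp only [sumOf, List.filter_cons, h1, h2] at *
        have := ih hnd'
        simp [hmem] at *
        omega

-- one step of the prefix statistics
theorem SfM_step (bs : List Int) (a : Int) (hnd : bs.Nodup) :
    SfM bs a = SfM bs (a - 1) + (if a ∈ bs then 0 else a) := by
  unfold SfM
  rw [tri_step, sumOf_step bs a hnd]
  split <;> ring

theorem CfM_step (bs : List Int) (a : Int) (hnd : bs.Nodup) :
    CfM bs a = CfM bs (a - 1) + (if a ∈ bs then 0 else 1) := by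
  unfold CfM
  rw [cntOf_step bs a hnd]
  split <;> ring

theorem SfM_mono (bs : List Int) (hnd : bs.Nodup) :
    ∀ (k : Nat) (m m' : Int), 0 ≤ m → m ≤ m' → m' - m = (k : Int) →
    SfM bs m ≤ SfM bs m' := by
  intro k
  induction k with
  | zero =>
    intro m m' _ _ h
    exact le_of_eq (congrArg (SfM bs) (by omega : m = m'))
  | succ k ih =>
    intro m m' hm hmm h
    have h1 : SfM bs m' = SfM bs (m' - 1) + (if m' ∈ bs then 0 else m') := SfM_step bs m' hnd
    have h2 : SfM bs m ≤ SfM bs (m' - 1) := ih m (m' - 1) hm (by omega) (by omega)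
    have : (0 : Int) ≤ (if m' ∈ bs then 0 else m') := by split <;> omega
    omega

-- the bisection loop finds the split point of bs at m
theorem bisLoop_inv (bs : List Int) (m : Int) (hpw : bs.Pairwise (· < ·)) :
    ∀ (fuel : Nat) (lo hi : Int), 0 ≤ lo → lo ≤ hi → hi ≤ (bs.length : Int) →
    hi - lo ≤ (fuel : Int) →
    (∀ (i : Nat) (h : i < bs.length), (i : Int) < lo → bs[i] ≤ m) →
    (∀ (i : Nat) (h : i < bs.length), hi ≤ (i : Int) → m < bs[i]) →
    ∃ r : Nat, bisLoop bs m fuel lo hi = (r : Int) ∧ r ≤ bs.length ∧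
      (∀ (i : Nat) (h : i < bs.length), i < r → bs[i] ≤ m) ∧
      (∀ (i : Nat) (h : i < bs.length), r ≤ i → m < bs[i]) := by
  intro fuel
  induction fuel with
  | zero =>
    intro lo hi h0 hlh hhl hf hL hR
    have heq : lo = hi := by omega
    refine ⟨lo.toNat, ?_, by omega, ?_, ?_⟩
    · simp [bisLoop]; omega
    · intro i h hi'; exact hL i h (by omega)
    · intro i h hi'; exact hR i h (by omega)
  | succ fuel ih =>
    intro lo hi h0 hlh hhl hf hL hR
    by_cases hlt : lo < hi
    · have hmid1 := (PySem.Int.floordiv_two_mid_bounds (by omega : lo ≤ hi)).1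
      have hmid2 : PySem.Int.floordiv (lo + hi) 2 < hi :=
        (PySem.Int.floordiv_lt_iff_lt_mul (by norm_num)).mpr (by omega)
      set mid := PySem.Int.floordiv (lo + hi) 2 with hmiddef
      have hmrange : 0 ≤ mid ∧ mid < (bs.length : Int) := ⟨by omega, by omega⟩
      have hget : PySem.List.pyGetD bs mid 0 = bs[mid.toNat]'(by omega) :=
        PySem.List.pyGetD_eq_getElem bs 0 hmrange.1 hmrange.2
      rw [bisLoop, if_pos hlt, ← hmiddef]
      by_cases hcmp : PySem.List.pyGetD bs mid 0 ≤ m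
      · rw [if_pos hcmp]
        refine ih (mid + 1) hi (by omega) (by omega) hhl (by omega) ?_ hR
        intro i h hi'
        have : bs[i] ≤ bs[mid.toNat]'(by omega) := by
          rcases Nat.lt_or_ge i mid.toNat with hc | hc
          · exact le_of_lt (List.pairwise_iff_getElem.mp hpw i mid.toNat h (by omega) hc)
          · have : i = mid.toNat := by omega
            simp [this]
        omega
      · rw [if_neg hcmp]
        refine ih lo mid h0 (by omega) (by omega) (by omega) hL ?_
        intro i h hi'
        have : bs[mid.toNat]'(by omega) ≤ bs[i] := by
          rcases Nat.lt_or_ge mid.toNat i with hc | hc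
          · exact le_of_lt (List.pairwise_iff_getElem.mp hpw mid.toNat i (by omega) h hc)
          · have : i = mid.toNat := by omega
            simp [this]
        omega
    · rw [bisLoop, if_neg hlt]
      have heq : lo = hi := by omega
      refine ⟨lo.toNat, by omega, by omega, ?_, ?_⟩
      · intro i h hi'; exact hL i h (by omega)
      · intro i h hi'; exact hR i h (by omega)

-- a split point r turns the filter into a take
theorem filter_eq_take_of_split (m : Int) :
    ∀ (bs : List Int) (r : Nat), r ≤ bs.length →
    (∀ (i : Nat) (h : i < bs.length), i < r → bs[i] ≤ m) →
    (∀ (i : Nat) (h : i < bs.length), r ≤ i → m < bs[i]) →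
    bs.filter (fun b => decide (b ≤ m)) = bs.take r := by
  intro bs
  induction bs with
  | nil => intro r _ _ _; simp
  | cons b t ih =>
    intro r hr hL hR
    match r with
    | 0 =>
      have hall : ∀ x ∈ b :: t, ¬ (x ≤ m) := by
        intro x hx
        obtain ⟨i, h, hxi⟩ := List.mem_iff_getElem.mp hx
        have := hR i h (by omega)
        omega
      rw [List.take_zero, List.filter_eq_nil_iff.mpr (by intro x hx; simpa using hall x hx)]
    | r + 1 =>
      have hb : b ≤ m := by simpa using hL 0 (by simp) (by omega)
      rw [List.take_succ_cons, List.filter_cons, if_pos (by simpa using hb)]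
      rw [ih r (by simpa using hr)
        (fun i h hi => by simpa using hL (i + 1) (by simpa using h) (by omega))
        (fun i h hi => by simpa using hR (i + 1) (by simpa using h) (by omega))]

-- the bisection result is the number of elements ≤ m
theorem bis_eq_cntOf (bs : List Int) (m : Int) (hpw : bs.Pairwise (· < ·)) :
    bis bs m = cntOf bs m ∧
    bs.filter (fun b => decide (b ≤ m)) = bs.take (bis bs m).toNat := by
  obtain ⟨r, hr, hrlen, hL, hR⟩ := bisLoop_inv bs m hpw bs.length 0 (bs.length : Int)
    (by omega) (by omega) (by omega) (by omega)
    (by intro i h hi; omega) (by intro i h hi; omega)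
  have hfilter := filter_eq_take_of_split m bs r hrlen hL hR
  have hcnt : cntOf bs m = (r : Int) := by
    unfold cntOf
    rw [hfilter, List.length_take]
    omega
  unfold bis
  rw [hr, hcnt]
  constructor
  · rfl
  · simpa using hfilter

-- the prefix-sum list: element i is the sum of the first i elements
theorem pref_fold (bs : List Int) :
    ∀ (pref0 : List Int) (run0 : Int),
    (bs.foldl (fun (st : List Int × Int) b => (st.1 ++ [st.2 + b], st.2 + b)) (pref0, run0)).1
      = pref0 ++ (List.range bs.length).map (fun i => run0 + (bs.take (i + 1)).sum) := by
  induction bs with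
  | nil => intro pref0 run0; simp
  | cons b t ih =>
    intro pref0 run0
    rw [List.foldl_cons, ih]
    simp only [List.length_cons, List.range_succ_eq_map, List.map_cons, List.map_map]
    simp [Function.comp, add_assoc, List.append_assoc]

theorem pref_get (bs : List Int) (k : Nat) (hk : k ≤ bs.length) :
    PySem.List.pyGetD
      ((bs.foldl (fun (st : List Int × Int) b => (st.1 ++ [st.2 + b], st.2 + b)) ([0], 0)).1)
      (k : Int) 0 = (bs.take k).sum := by
  rw [pref_fold bs [0] 0]
  have hlen : ((0 : Int) :: (List.range bs.length).map (fun i => 0 + (bs.take (i + 1)).sum)).length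
      = bs.length + 1 := by simp
  rw [show ([(0:Int)] ++ (List.range bs.length).map (fun i => 0 + (bs.take (i + 1)).sum))
      = (0 : Int) :: (List.range bs.length).map (fun i => 0 + (bs.take (i + 1)).sum) from rfl]
  rw [PySem.List.pyGetD_eq_getElem _ _ (by omega) (by rw [hlen]; push_cast; omega)]
  match k with
  | 0 => simp
  | k + 1 =>
    have hk' : k < bs.length := by omega
    simp [List.getElem_cons_succ, hk']

-- stats(m) computes exactly (CfM, SfM)
theorem altStats_eq (bs : List Int) (hpw : bs.Pairwise (· < ·)) (m : Int) :
    altStats bs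
      ((bs.foldl (fun (st : List Int × Int) b => (st.1 ++ [st.2 + b], st.2 + b)) ([0], 0)).1)
      (bis bs 0) m = (CfM bs m, SfM bs m) := by
  obtain ⟨hbm, hfm⟩ := bis_eq_cntOf bs m hpw
  obtain ⟨hb0, hf0⟩ := bis_eq_cntOf bs 0 hpw
  have hmnat : bis bs m = ((bis bs m).toNat : Int) := by
    rw [hbm]; unfold cntOf; omega
  have h0nat : bis bs 0 = ((bis bs 0).toNat : Int) := by
    rw [hb0]; unfold cntOf; omega
  have hmlen : (bis bs m).toNat ≤ bs.length := by
    have : cntOf bs m ≤ (bs.length : Int) := by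
      unfold cntOf
      exact_mod_cast Int.ofNat_le.mpr (List.length_filter_le _ _)
    omega
  have h0len : (bis bs 0).toNat ≤ bs.length := by
    have : cntOf bs 0 ≤ (bs.length : Int) := by
      unfold cntOf
      exact_mod_cast Int.ofNat_le.mpr (List.length_filter_le _ _)
    omega
  have e1 : PySem.List.pyGetD
      ((bs.foldl (fun (st : List Int × Int) b => (st.1 ++ [st.2 + b], st.2 + b)) ([0], 0)).1)
      (bis bs m) 0 = sumOf bs m := by
    rw [hmnat, pref_get bs _ hmlen]
    unfold sumOf
    rw [hfm]
  have e0 : PySem.List.pyGetD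
      ((bs.foldl (fun (st : List Int × Int) b => (st.1 ++ [st.2 + b], st.2 + b)) ([0], 0)).1)
      (bis bs 0) 0 = sumOf bs 0 := by
    rw [h0nat, pref_get bs _ h0len]
    unfold sumOf
    rw [hf0]
  unfold altStats CfM SfM
  rw [e1, e0, hbm, hb0]

def IsBest (bs : List Int) (n maxSum r : Int) : Prop :=
  0 ≤ r ∧ r ≤ n ∧ SfM bs r ≤ maxSum ∧ ∀ m, r < m → m ≤ n → maxSum < SfM bs m

theorem altSearch_isBest (bs : List Int) (n maxSum : Int)
    (hpw : bs.Pairwise (· < ·)) (hnd : bs.Nodup) :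
    ∀ (fuel : Nat) (lo hi : Int), 0 ≤ lo → lo ≤ hi → hi ≤ n → hi - lo ≤ (fuel : Int) →
    SfM bs lo ≤ maxSum → (∀ m, hi < m → m ≤ n → maxSum < SfM bs m) →
    IsBest bs n maxSum (altSearch bs
      ((bs.foldl (fun (st : List Int × Int) b => (st.1 ++ [st.2 + b], st.2 + b)) ([0], 0)).1)
      (bis bs 0) maxSum fuel lo hi) := by
  intro fuel
  induction fuel with
  | zero =>
    intro lo hi h0 hlh hhn hf hP hU
    have : lo = hi := by omega
    subst this
    exact ⟨h0, hhn, hP, hU⟩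
  | succ fuel ih =>
    intro lo hi h0 hlh hhn hf hP hU
    by_cases hlt : lo < hi
    · have hmid := PySem.Int.floordiv_two_mid_bounds (lo := lo + 1) (hi := hi) (by omega)
      have harg : lo + hi + 1 = (lo + 1) + hi := by ring
      rw [altSearch, if_pos hlt, harg]
      rw [altStats_eq bs hpw]
      by_cases hp : SfM bs (PySem.Int.floordiv ((lo + 1) + hi) 2) ≤ maxSum
      · rw [if_pos hp]
        exact ih _ hi (by omega) (by omega) hhn (by omega) hp hU
      · rw [if_neg hp]
        refine ih lo _ h0 (by omega) (by omega) (by omega) hP ?_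
        intro m hm hmn
        have hmono := SfM_mono bs hnd (m - PySem.Int.floordiv ((lo + 1) + hi) 2).toNat
          (PySem.Int.floordiv ((lo + 1) + hi) 2) m (by omega) (by omega) (by omega)
        omega
    · rw [altSearch, if_neg hlt]
      have : lo = hi := by omega
      subst this
      exact ⟨h0, hhn, hP, hU⟩

-- A's loop returns res immediately when the budget is negative
theorem loopA_neg (s : PySem.Set Int) (n maxSum : Int) (hms : maxSum < 0) :
    ∀ (k : Nat) (num res cur : Int), n + 1 - num ≤ (k : Int) → 1 ≤ num → 0 ≤ cur →
    maxCountLoop s n maxSum num res cur = res := by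
  intro k
  induction k with
  | zero =>
    intro num res cur hk h1 hcur
    rw [maxCountLoop, if_neg (by omega)]
  | succ k ih =>
    intro num res cur hk h1 hcur
    rw [maxCountLoop]
    by_cases hlt : num < n + 1
    · rw [if_pos hlt]
      by_cases hm : num ∈ s
      · rw [if_neg (by simp [hm])]
        exact ih (num + 1) res cur (by omega) (by omega) hcur
      · rw [if_pos (by simp [hm]), if_pos (by omega)]
    · rw [if_neg hlt]

-- main invariant for A's loop: starting at a with the true prefix sum, it lands on the optimum r
theorem loopA_eq (banned bs : List Int) (n maxSum : Int)
    (hnd : bs.Nodup)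
    (hbs : ∀ b, b ∈ bs ↔ b ∈ banned)
    (r : Int) (hr : IsBest bs n maxSum r) :
    ∀ (k : Nat) (a res : Int), n + 1 - a = (k : Int) → 1 ≤ a → a ≤ n + 1 →
    SfM bs (a - 1) ≤ maxSum →
    maxCountLoop (PySem.Set.ofList banned) n maxSum a res (SfM bs (a - 1))
      = res + (CfM bs r - CfM bs (a - 1)) := by
  obtain ⟨hr0, hrn, hrP, hrU⟩ := hr
  intro k
  induction k with
  | zero =>
    intro a res hk h1 h2 hP
    have ha : a = n + 1 := by omega
    subst ha
    have : r = n + 1 - 1 := by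
      by_contra hne
      have : r < n := by omega
      exact absurd hP (by simpa using hrU n (by omega) (by omega))
    rw [← this]
    rw [maxCountLoop, if_neg (by omega)]
    ring
  | succ k ih =>
    intro a res hk h1 h2 hP
    have han : a ≤ n := by omega
    rw [maxCountLoop, if_pos (by omega)]
    have hmem : a ∈ PySem.Set.ofList banned ↔ a ∈ bs := by
      rw [PySem.Set.mem_ofList, hbs]
    have hSstep := SfM_step bs a hnd
    have hCstep := CfM_step bs a hnd
    by_cases hab : a ∈ bs
    · rw [if_neg (by simp [hmem, hab])]
      simp only [hab, if_true] at hSstep hCstep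
      have hSa : SfM bs a = SfM bs (a - 1) := by omega
      have hCa : CfM bs a = CfM bs (a - 1) := by omega
      have := ih (a + 1) res (by omega) (by omega) (by omega)
        (by rw [show a + 1 - 1 = a by ring, hSa]; exact hP)
      rw [show a + 1 - 1 = a by ring, hSa, hCa] at this
      exact this
    · rw [if_pos (by simp [hmem, hab])]
      simp only [hab, if_false] at hSstep hCstep
      by_cases hover : SfM bs (a - 1) + a > maxSum
      · rw [if_pos hover]
        have hra : r = a - 1 := by
          by_contra hne
          have hralt : a ≤ r := by
            by_cases h : r < a - 1
            · exact absurd hP (by simpa using hrU (a - 1) (by omega) (by omega))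
            · omega
          have := SfM_mono bs hnd (r - a).toNat a r (by omega) (by omega) (by omega)
          omega
        rw [hra]
        ring
      · rw [if_neg hover]
        have hSa : SfM bs a = SfM bs (a - 1) + a := by omega
        have := ih (a + 1) (res + 1) (by omega) (by omega) (by omega)
          (by rw [show a + 1 - 1 = a by ring, hSa]; omega)
        rw [show a + 1 - 1 = a by ring] at this
        rw [← hSa]
        rw [this]
        omega

-- ===== VERDICT (by name: the statement is the Claim_ definition above) =====
theorem maxCount_spec : Claim_equal_maxCount := by
  intro banned n maxSum _hdom
  unfold Spec_maxCount maxCount maxCount_alt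
  set bs : List Int := PySem.List.sorted (PySem.Set.ofList banned) (fun x => x) false with hbsdef
  have hpw : bs.Pairwise (· < ·) := PySem.List.sorted_ofList_pairwise_lt banned
  have hnd : bs.Nodup := hpw.imp ne_of_lt
  have hbs : ∀ b, b ∈ bs ↔ b ∈ banned := by
    intro b
    rw [hbsdef, PySem.List.mem_sorted, PySem.Set.mem_ofList]
  by_cases hn : n ≤ 0
  · rw [if_pos (Or.inl hn), maxCountLoop, if_neg (by omega)]
  · by_cases hms : maxSum < 0
    · rw [if_pos (Or.inr hms)]
      exact loopA_neg _ n maxSum hms n.toNat 1 0 0 (by omega) (by omega) (by omega)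
    · rw [if_neg (by tauto)]
      show maxCountLoop (PySem.Set.ofList banned) n maxSum 1 0 0 =
        (altStats bs
          ((bs.foldl (fun (st : List Int × Int) b => (st.1 ++ [st.2 + b], st.2 + b)) ([0], 0)).1)
          (bis bs 0)
          (altSearch bs
            ((bs.foldl (fun (st : List Int × Int) b => (st.1 ++ [st.2 + b], st.2 + b)) ([0], 0)).1)
            (bis bs 0) maxSum n.toNat 0 n)).1
      have hS0 : SfM bs 0 = 0 := by unfold SfM; ring_nf; simp [PySem.Int.floordiv]
      have hC0 : CfM bs 0 = 0 := by unfold CfM; ring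
      have hbest := altSearch_isBest bs n maxSum hpw hnd n.toNat 0 n (by omega) (by omega)
        (by omega) (by omega) (by rw [hS0]; omega) (by intro m h1 h2; omega)
      rw [altStats_eq bs hpw]
      have := loopA_eq banned bs n maxSum hnd hbs _ hbest (n + 1 - 1).toNat 1 0
        (by omega) (by omega) (by omega) (by rw [show (1:Int) - 1 = 0 by norm_num, hS0]; omega)
      rw [show (1:Int) - 1 = 0 by norm_num, hS0, hC0] at this
      simpa using this
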